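-- pv_equiv track=rewrite | github.com/lsr00ter/infinite-derp | main.py | deduplicate_and_sort_nodes
-- ===== SOURCE A (Python) =====
-- def deduplicate_and_sort_nodes(nodes):
--     """Deduplicate nodes by HostName and sort them by HostName."""
--     unique_nodes = {}
--     for node in nodes:
--         key = node["HostName"]
--         if key not in unique_nodes:
--             unique_nodes[key] = node
--     sorted_nodes = sorted(unique_nodes.values(), key=lambda n: n["HostName"])
--     return sorted_nodes
-- ===== SOURCE B (Python) =====
-- def deduplicate_and_sort_nodes(nodes):
--     """Deduplicate nodes by HostName and sort them by HostName."""
--     ordered = sorted(nodes, key=lambda n: n["HostName"])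
--     result = []
--     last = None
--     for node in ordered:
--         k = node["HostName"]
--         if last is None or k != last:
--             result.append(node)
--             last = k
--     return result
-- ===== Notes on version B (the rewrite author's own statement) =====
-- stated objective: alternative
-- what changed: B stable-sorts first and deduplicates by comparing each node's HostName with the previously kept one in a single adjacency pass, instead of A's hash-dict first-occurrence dedup followed by sorting the surviving values.
import Mathlib
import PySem

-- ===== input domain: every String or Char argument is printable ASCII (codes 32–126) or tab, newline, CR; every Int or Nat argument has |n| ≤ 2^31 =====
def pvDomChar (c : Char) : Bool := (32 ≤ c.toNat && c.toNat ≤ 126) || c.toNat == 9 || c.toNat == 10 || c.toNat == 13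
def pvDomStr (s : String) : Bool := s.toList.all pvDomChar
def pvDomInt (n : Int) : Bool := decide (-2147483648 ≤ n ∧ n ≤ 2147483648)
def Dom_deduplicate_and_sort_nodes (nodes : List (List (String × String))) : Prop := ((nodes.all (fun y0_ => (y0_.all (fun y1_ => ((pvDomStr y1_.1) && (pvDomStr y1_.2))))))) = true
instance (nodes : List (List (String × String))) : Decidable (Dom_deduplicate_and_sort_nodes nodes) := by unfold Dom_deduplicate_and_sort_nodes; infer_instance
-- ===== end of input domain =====

-- B sorts first (stable) and deduplicates in one adjacency pass over the sorted list,
-- instead of A's dict-based first-occurrence dedup followed by sorting the values; same cost, different decomposition.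

-- node["HostName"]: first-match lookup in the association list (total via getD ""; Pre_ guarantees the key is present)
def pvKey (n : List (String × String)) : String :=
  (((n.find? (fun p => p.1 == "HostName")).map Prod.snd).getD "")

-- ===== PORT A =====
def deduplicate_and_sort_nodes (nodes : List (List (String × String))) : List (List (String × String)) :=
  let unique_nodes : PySem.Dict String (List (String × String)) :=
    nodes.foldl (fun d node =>
      let key := pvKey node
      if d.contains key then d else d.insert key node) PySem.Dict.empty
  PySem.List.sorted unique_nodes.values pvKey false

-- ===== PORT B =====
def deduplicate_and_sort_nodes_alt (nodes : List (List (String × String))) : List (List (String × String)) :=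
  let ordered := PySem.List.sorted nodes pvKey false
  (ordered.foldl (fun st node =>
      let k := pvKey node
      if st.2 = some k then st else (st.1 ++ [node], some k))
    (([] : List (List (String × String))), (none : Option String))).1

-- ===== PRECONDITION & SPEC =====
-- Pre_ excludes exactly the nodes lacking a "HostName" key, on which the Python A raises KeyError.
def Pre_deduplicate_and_sort_nodes (nodes : List (List (String × String))) : Prop :=
  (nodes.all (fun n => n.any (fun p => p.1 == "HostName"))) = true
instance (nodes : List (List (String × String))) : Decidable (Pre_deduplicate_and_sort_nodes nodes) := by unfold Pre_deduplicate_and_sort_nodes; infer_instance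
def pvWitness_deduplicate_and_sort_nodes : (List (List (String × String))) :=
  ([[("HostName", "b"), ("X", "1")], [("HostName", "a")], [("HostName", "b"), ("X", "2")]])

def Spec_deduplicate_and_sort_nodes (nodes : List (List (String × String))) (out : List (List (String × String))) : Prop := out = deduplicate_and_sort_nodes_alt nodes
instance (nodes : List (List (String × String))) (out : List (List (String × String))) : Decidable (Spec_deduplicate_and_sort_nodes nodes out) := by unfold Spec_deduplicate_and_sort_nodes; infer_instance

-- ===== CLAIM (what is proved, stated in full; the proofs are below) =====
def Claim_equal_deduplicate_and_sort_nodes : Prop := ∀ (nodes : List (List (String × String))), Dom_deduplicate_and_sort_nodes nodes → Pre_deduplicate_and_sort_nodes nodes → Spec_deduplicate_and_sort_nodes nodes (deduplicate_and_sort_nodes nodes)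

-- ===== LEMMAS AND PROOFS =====

-- first occurrences of l, one node per key, skipping keys already in `seen`
def pvFirsts (seen : List String) : List (List (String × String)) → List (List (String × String))
  | [] => []
  | n :: t => if pvKey n ∈ seen then pvFirsts seen t else n :: pvFirsts (pvKey n :: seen) t

-- the body of A's dict-building loop / of B's adjacency loop, named for the proofs
def pvStepA (d : PySem.Dict String (List (String × String))) (node : List (String × String)) :
    PySem.Dict String (List (String × String)) :=
  if d.contains (pvKey node) then d else d.insert (pvKey node) node

def pvStepB (st : List (List (String × String)) × Option String) (node : List (String × String)) :
    List (List (String × String)) × Option String :=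
  if st.2 = some (pvKey node) then st else (st.1 ++ [node], some (pvKey node))

theorem pvFirsts_congr {s1 s2 : List String} (l : List (List (String × String)))
    (h : ∀ x ∈ l, (pvKey x ∈ s1 ↔ pvKey x ∈ s2)) : pvFirsts s1 l = pvFirsts s2 l := by
  induction l generalizing s1 s2 with
  | nil => rfl
  | cons n t ih =>
    have hn := h n (by simp)
    have ht : ∀ x ∈ t, (pvKey x ∈ s1 ↔ pvKey x ∈ s2) := fun x hx => h x (List.mem_cons_of_mem n hx)
    by_cases hm : pvKey n ∈ s1
    · rw [pvFirsts, pvFirsts, if_pos hm, if_pos (hn.mp hm)]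
      exact ih ht
    · rw [pvFirsts, pvFirsts, if_neg hm, if_neg (fun hc => hm (hn.mpr hc))]
      exact congrArg _ (ih (fun x hx => by simp [List.mem_cons, ht x hx]))

theorem pvMem_firsts {x : List (String × String)} (seen : List String) (l : List (List (String × String))) :
    x ∈ pvFirsts seen l ↔ pvKey x ∉ seen ∧ l.find? (fun m => pvKey m == pvKey x) = some x := by
  induction l generalizing seen with
  | nil => simp [pvFirsts]
  | cons n t ih =>
    by_cases hk : pvKey n = pvKey x
    · rw [pvFirsts, List.find?_cons_of_pos (by simp [hk])]
      by_cases hm : pvKey n ∈ seen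
      · rw [if_pos hm, ih]
        constructor
        · rintro ⟨h1, _⟩; exact absurd (hk ▸ hm) h1
        · rintro ⟨h1, _⟩; exact absurd (hk ▸ hm) h1
      · rw [if_neg hm]
        constructor
        · intro hmem
          rcases List.mem_cons.mp hmem with rfl | hmem'
          · exact ⟨hk ▸ hm, rfl⟩
          · exact ((((ih _).mp hmem').1) (by simp [hk])).elim
        · rintro ⟨_, h2⟩
          rw [(Option.some.inj h2).symm]
          exact List.mem_cons_self ..
    · rw [pvFirsts, List.find?_cons_of_neg (by simp [hk])]
      by_cases hm : pvKey n ∈ seen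
      · rw [if_pos hm, ih]
      · rw [if_neg hm]
        constructor
        · intro hmem
          rcases List.mem_cons.mp hmem with rfl | hmem'
          · exact absurd rfl hk
          · have h' := (ih _).mp hmem'
            exact ⟨fun hc => h'.1 (List.mem_cons_of_mem _ hc), h'.2⟩
        · rintro ⟨h1, h2⟩
          refine List.mem_cons.mpr (Or.inr ((ih _).mpr ⟨?_, h2⟩))
          intro hc
          rcases List.mem_cons.mp hc with he | hc'
          · exact hk he.symm
          · exact h1 hc'

theorem pvFirsts_key_ne (seen : List String) (l : List (List (String × String))) :
    (pvFirsts seen l).Pairwise (fun a b => pvKey a ≠ pvKey b) := by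
  induction l generalizing seen with
  | nil => exact List.Pairwise.nil
  | cons n t ih =>
    by_cases hm : pvKey n ∈ seen
    · rw [pvFirsts, if_pos hm]; exact ih seen
    · rw [pvFirsts, if_neg hm]
      refine List.Pairwise.cons ?_ (ih _)
      intro x hx he
      exact ((pvMem_firsts _ _).mp hx).1 (by simp [he])

theorem pvFirsts_nodup (seen : List String) (l : List (List (String × String))) :
    (pvFirsts seen l).Nodup :=
  (pvFirsts_key_ne seen l).imp (fun h he => h (congrArg pvKey he))

theorem pvFirsts_pairwise_lt (seen : List String) (l : List (List (String × String)))
    (hp : l.Pairwise (fun a b => pvKey a ≤ pvKey b)) :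
    (pvFirsts seen l).Pairwise (fun a b => pvKey a < pvKey b) := by
  induction l generalizing seen with
  | nil => exact List.Pairwise.nil
  | cons n t ih =>
    have hpt := (List.pairwise_cons.mp hp).2
    have hle := (List.pairwise_cons.mp hp).1
    by_cases hm : pvKey n ∈ seen
    · rw [pvFirsts, if_pos hm]; exact ih seen hpt
    · rw [pvFirsts, if_neg hm]
      refine List.Pairwise.cons ?_ (ih _ hpt)
      intro x hx
      have hc := (pvMem_firsts _ _).mp hx
      have hxt : x ∈ t := List.mem_of_find?_eq_some hc.2
      have hne : pvKey x ≠ pvKey n := fun he => hc.1 (by simp [he])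
      exact lt_of_le_of_ne (hle x hxt) (Ne.symm hne)

-- ===== A side: the dict fold collects the first occurrence of each key, in encounter order =====

theorem pvDict_contains_iff (d : PySem.Dict String (List (String × String))) (k : String) :
    d.contains k = true ↔ k ∈ d.keys := by
  simp [PySem.Dict.contains, PySem.Dict.keys, List.any_eq_true, List.mem_map]

theorem pvFoldA (l : List (List (String × String))) (d : PySem.Dict String (List (String × String))) :
    (l.foldl pvStepA d).values = d.values ++ pvFirsts d.keys l := by
  induction l generalizing d with
  | nil => simp [pvFirsts]
  | cons n t ih =>
    rw [List.foldl_cons]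
    by_cases hc : d.contains (pvKey n) = true
    · have hm : pvKey n ∈ d.keys := (pvDict_contains_iff d _).mp hc
      rw [pvStepA, if_pos hc, ih, pvFirsts, if_pos hm]
    · have hm : pvKey n ∉ d.keys := fun h => hc ((pvDict_contains_iff d _).mpr h)
      have hi : (d.insert (pvKey n) n).items = d.items ++ [(pvKey n, n)] := by
        simp [PySem.Dict.insert, hc]
      have hkeys : (d.insert (pvKey n) n).keys = d.keys ++ [pvKey n] := by
        simp [PySem.Dict.keys, hi]
      have hvals : (d.insert (pvKey n) n).values = d.values ++ [n] := by
        simp [PySem.Dict.values, hi]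
      rw [pvStepA, if_neg (by simp [hc]), ih, hkeys, hvals, pvFirsts, if_neg hm,
          pvFirsts_congr t (s2 := pvKey n :: d.keys) (fun x _ => by simp [or_comm])]
      simp

-- ===== stability of sorted: filtering one key class is unchanged =====

theorem pvFilter_insertBy (x : List (String × String)) (k : String) (ys : List (List (String × String)))
    (hp : ys.Pairwise (fun a b => pvKey a ≤ pvKey b)) :
    (PySem.List.insertBy (fun a b => decide (pvKey a < pvKey b)) x ys).filter (fun m => pvKey m == k) =
      ys.filter (fun m => pvKey m == k) ++ (if pvKey x == k then [x] else []) := by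
  induction ys with
  | nil => simp [PySem.List.insertBy, List.filter]; split <;> simp_all
  | cons y ys ih =>
    have hpt := (List.pairwise_cons.mp hp).2
    have hle := (List.pairwise_cons.mp hp).1
    by_cases hb : pvKey x < pvKey y
    · rw [PySem.List.insertBy, if_pos (by simpa using hb)]
      by_cases hxk : pvKey x = k
      · have hnil : (y :: ys).filter (fun m => pvKey m == k) = [] := by
          rw [List.filter_eq_nil_iff]
          intro m hm
          have hym : pvKey y ≤ pvKey m := by
            rcases List.mem_cons.mp hm with rfl | hm'
            · exact le_refl _
            · exact hle m hm'
          simp only [beq_iff_eq]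
          intro he
          have h2 : pvKey x < pvKey m := lt_of_lt_of_le hb hym
          rw [he, ← hxk] at h2
          exact lt_irrefl _ h2
        simp [hxk, hnil]
      · simp [List.filter_cons, hxk]
    · rw [PySem.List.insertBy, if_neg (by simpa using hb)]
      rw [List.filter_cons, ih hpt, List.filter_cons]
      split <;> simp

theorem pvFilter_sorted (l : List (List (String × String))) (k : String) :
    (PySem.List.sorted l pvKey false).filter (fun m => pvKey m == k) = l.filter (fun m => pvKey m == k) := by
  induction l using List.reverseRecOn with
  | nil => rfl
  | append_singleton l x ih =>
    rw [PySem.List.sorted_eq_foldl_insertBy, List.foldl_append, List.foldl_cons, List.foldl_nil,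
        ← PySem.List.sorted_eq_foldl_insertBy,
        pvFilter_insertBy x k _ (PySem.List.sorted_pairwise l pvKey), ih, List.filter_append]
    simp [List.filter_cons]

theorem pvFind_sorted (l : List (List (String × String))) (k : String) :
    (PySem.List.sorted l pvKey false).find? (fun m => pvKey m == k) = l.find? (fun m => pvKey m == k) := by
  rw [Eq.symm List.head?_filter, Eq.symm List.head?_filter, pvFilter_sorted]

-- ===== B side: the adjacency scan over a key-sorted list is pvFirsts =====

theorem pvScan_some (l : List (List (String × String))) (acc : List (List (String × String))) (m : String)
    (hp : l.Pairwise (fun a b => pvKey a ≤ pvKey b)) (hm : ∀ n ∈ l, m ≤ pvKey n) :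
    (l.foldl pvStepB (acc, some m)).1 = acc ++ pvFirsts [m] l := by
  induction l generalizing acc m with
  | nil => simp [pvFirsts]
  | cons n t ih =>
    have hpt := (List.pairwise_cons.mp hp).2
    have hle := (List.pairwise_cons.mp hp).1
    rw [List.foldl_cons]
    by_cases hk : pvKey n = m
    · rw [show pvStepB (acc, some m) n = (acc, some m) by simp [pvStepB, hk]]
      rw [ih acc m hpt (fun x hx => hk ▸ hle x hx), pvFirsts, if_pos (by simp [hk])]
    · rw [show pvStepB (acc, some m) n = (acc ++ [n], some (pvKey n)) by
        simp [pvStepB]; intro h; exact absurd h.symm hk]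
      rw [ih (acc ++ [n]) (pvKey n) hpt hle]
      have hmlt : m < pvKey n := lt_of_le_of_ne (hm n (by simp)) (Ne.symm hk)
      have hcg : pvFirsts [pvKey n, m] t = pvFirsts [pvKey n] t := by
        apply pvFirsts_congr
        intro x hx
        have hnx : pvKey n ≤ pvKey x := hle x hx
        constructor
        · intro h
          rcases List.mem_cons.mp h with h' | h'
          · simp [h']
          · have : pvKey x = m := by simpa using h'
            rw [this] at hnx
            exact absurd (lt_of_lt_of_le hmlt hnx) (lt_irrefl _)
        · intro h
          exact List.mem_cons.mpr (Or.inl (by simpa using h))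
      rw [pvFirsts, if_neg (by simpa using hk), hcg]
      simp

theorem pvScan_none (l : List (List (String × String)))
    (hp : l.Pairwise (fun a b => pvKey a ≤ pvKey b)) :
    (l.foldl pvStepB (([] : List (List (String × String))), (none : Option String))).1 = pvFirsts [] l := by
  cases l with
  | nil => simp [pvFirsts]
  | cons n t =>
    have hpt := (List.pairwise_cons.mp hp).2
    rw [List.foldl_cons, show pvStepB ([], none) n = ([] ++ [n], some (pvKey n)) by simp [pvStepB]]
    rw [pvScan_some t ([] ++ [n]) (pvKey n) hpt (List.pairwise_cons.mp hp).1]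
    rw [pvFirsts, if_neg (by simp)]
    simp

-- ===== VERDICT (by name: the statement is the Claim_ definition above) =====
theorem deduplicate_and_sort_nodes_spec : Claim_equal_deduplicate_and_sort_nodes := by
  intro nodes _ _
  unfold Spec_deduplicate_and_sort_nodes
  have hA : deduplicate_and_sort_nodes nodes
      = PySem.List.sorted (nodes.foldl pvStepA PySem.Dict.empty).values pvKey false := rfl
  have hB : deduplicate_and_sort_nodes_alt nodes
      = ((PySem.List.sorted nodes pvKey false).foldl pvStepB ([], none)).1 := rfl
  rw [hA, hB, pvFoldA nodes PySem.Dict.empty,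
      pvScan_none (PySem.List.sorted nodes pvKey false) (PySem.List.sorted_pairwise nodes pvKey)]
  have hempty : (PySem.Dict.empty : PySem.Dict String (List (String × String))).values = []
      ∧ (PySem.Dict.empty : PySem.Dict String (List (String × String))).keys = [] := ⟨rfl, rfl⟩
  rw [hempty.1, hempty.2, List.nil_append]
  have hperm : (pvFirsts [] (PySem.List.sorted nodes pvKey false)).Perm (pvFirsts [] nodes) := by
    rw [List.perm_ext_iff_of_nodup (pvFirsts_nodup _ _) (pvFirsts_nodup _ _)]
    intro a
    rw [pvMem_firsts, pvMem_firsts, pvFind_sorted]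
  have hpw : (pvFirsts [] (PySem.List.sorted nodes pvKey false)).Pairwise (fun a b => pvKey a < pvKey b) :=
    pvFirsts_pairwise_lt [] _ (PySem.List.sorted_pairwise nodes pvKey)
  exact PySem.List.sorted_eq_of_perm_of_pairwise_lt _ _ _ hperm hpw
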